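-- pv_equiv track=rewrite | github.com/robinkashyap/CP-Coding | Strings/CountVCDS.py | countVCDS
-- ===== SOURCE A (Python) =====
-- def countVCDS(str):
--     v, c, d, s = 0, 0, 0, 0
--     for i in str:
--         if((i >= 'a' and i <= 'z') or (i >= 'A' and i <= 'Z')):
--             i = i.lower()
--             if(i == 'a' or i == 'e' or i == 'i' or i == 'o' or i == 'u'):
--                 v = v + 1
--             else:
--                 c = c + 1
--         elif (i >= '0' and i <= '9'):
--             d = d + 1
--         else:
--             s = s + 1
--     return v, c, d, s
-- ===== SOURCE B (Python) =====
-- def countVCDS(str):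
--     # One filter pass collects the lowercased letters; vowels counted among them,
--     # consonants, digits and specials derived by subtraction / a separate digit scan.
--     letters = [ch.lower() for ch in str if ('a' <= ch <= 'z') or ('A' <= ch <= 'Z')]
--     v = sum(1 for ch in letters if ch in 'aeiou')
--     c = len(letters) - v
--     d = sum(1 for ch in str if '0' <= ch <= '9')
--     s = len(str) - len(letters) - d
--     return v, c, d, s
-- ===== Notes on version B (the rewrite author's own statement) =====
-- stated objective: alternative
-- what changed: Replaces the single four-way accumulator loop with independent passes: a filter pass collecting lowercased letters, a vowel count over them, a digit scan, with consonants and specials derived by subtraction.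
import Mathlib
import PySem

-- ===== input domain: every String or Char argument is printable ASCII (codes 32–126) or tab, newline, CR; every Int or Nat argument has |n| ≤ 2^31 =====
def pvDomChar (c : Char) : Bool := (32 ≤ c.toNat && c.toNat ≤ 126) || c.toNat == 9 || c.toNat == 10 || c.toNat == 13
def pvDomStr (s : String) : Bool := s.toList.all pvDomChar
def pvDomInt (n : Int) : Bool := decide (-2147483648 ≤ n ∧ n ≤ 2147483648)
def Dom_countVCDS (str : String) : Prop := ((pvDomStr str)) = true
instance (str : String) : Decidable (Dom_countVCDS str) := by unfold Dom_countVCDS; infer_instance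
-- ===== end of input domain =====

-- B replaces A's single four-way accumulator loop with independent passes (letters filter,
-- vowel count, digit scan) deriving consonants and specials by subtraction; same cost, alternative decomposition.


-- ===== PORT A =====
-- literal transliteration: one fold over the characters with the four counters as state
def countVCDS (str : String) : Int × Int × Int × Int :=
  str.toList.foldl
    (fun (st : Int × Int × Int × Int) i =>
      let (v, c, d, s) := st
      if ('a' ≤ i ∧ i ≤ 'z') ∨ ('A' ≤ i ∧ i ≤ 'Z') then
        let i := PySem.Chars.lowerChar i
        if i = 'a' ∨ i = 'e' ∨ i = 'i' ∨ i = 'o' ∨ i = 'u' then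
          (v + 1, c, d, s)
        else
          (v, c + 1, d, s)
      else if '0' ≤ i ∧ i ≤ '9' then
        (v, c, d + 1, s)
      else
        (v, c, d, s + 1))
    (0, 0, 0, 0)

-- ===== PORT B =====
def pvIsLetter (ch : Char) : Bool := ('a' ≤ ch ∧ ch ≤ 'z') ∨ ('A' ≤ ch ∧ ch ≤ 'Z')
def pvIsVowel (ch : Char) : Bool := ch ∈ ['a', 'e', 'i', 'o', 'u']
def pvIsDigit (ch : Char) : Bool := '0' ≤ ch ∧ ch ≤ '9'

def countVCDS_alt (str : String) : Int × Int × Int × Int :=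
  let letters := (str.toList.filter pvIsLetter).map PySem.Chars.lowerChar
  let v : Int := (letters.filter pvIsVowel).length
  let c : Int := (letters.length : Int) - v
  let d : Int := ((str.toList.filter pvIsDigit).length : Int)
  let s : Int := (str.toList.length : Int) - (letters.length : Int) - d
  (v, c, d, s)

-- ===== PRECONDITION & SPEC =====
def Spec_countVCDS (str : String) (out : Int × Int × Int × Int) : Prop := out = countVCDS_alt str
instance (str : String) (out : Int × Int × Int × Int) : Decidable (Spec_countVCDS str out) := by unfold Spec_countVCDS; infer_instance

-- ===== CLAIM (what is proved, stated in full; the proofs are below) =====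
def Claim_equal_countVCDS : Prop := ∀ (str : String), Dom_countVCDS str → Spec_countVCDS str (countVCDS str)

-- ===== LEMMAS AND PROOFS =====

-- A's fold over any character list, from any start state, adds B's per-category counts.
theorem countVCDS_fold_eq (l : List Char) (v c d s : Int) :
    l.foldl
      (fun (st : Int × Int × Int × Int) i =>
        let (v, c, d, s) := st
        if ('a' ≤ i ∧ i ≤ 'z') ∨ ('A' ≤ i ∧ i ≤ 'Z') then
          let i := PySem.Chars.lowerChar i
          if i = 'a' ∨ i = 'e' ∨ i = 'i' ∨ i = 'o' ∨ i = 'u' then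
            (v + 1, c, d, s)
          else
            (v, c + 1, d, s)
        else if '0' ≤ i ∧ i ≤ '9' then
          (v, c, d + 1, s)
        else
          (v, c, d, s + 1))
      (v, c, d, s)
    = (v + (((l.filter pvIsLetter).map PySem.Chars.lowerChar).filter pvIsVowel).length,
       c + ((l.filter pvIsLetter).length : Int)
         - (((l.filter pvIsLetter).map PySem.Chars.lowerChar).filter pvIsVowel).length,
       d + ((l.filter pvIsDigit).length : Int),
       s + (l.length : Int) - ((l.filter pvIsLetter).length : Int)
         - ((l.filter pvIsDigit).length : Int)) := by
  induction l generalizing v c d s with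
  | nil => simp
  | cons hd tl ih =>
    by_cases hL : ('a' ≤ hd ∧ hd ≤ 'z') ∨ ('A' ≤ hd ∧ hd ≤ 'Z')
    · have hLb : pvIsLetter hd = true := by simp [pvIsLetter, hL]
      have hDb : pvIsDigit hd = false := by
        simp only [pvIsDigit, decide_eq_false_iff_not]
        rcases hL with ⟨h1, _⟩ | ⟨h1, _⟩ <;>
          · rintro ⟨_, g2⟩
            exact absurd (le_trans h1 g2) (by decide)
      by_cases hV : PySem.Chars.lowerChar hd = 'a' ∨ PySem.Chars.lowerChar hd = 'e' ∨
          PySem.Chars.lowerChar hd = 'i' ∨ PySem.Chars.lowerChar hd = 'o' ∨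
          PySem.Chars.lowerChar hd = 'u'
      · have hVb : pvIsVowel (PySem.Chars.lowerChar hd) = true := by
          simp [pvIsVowel]; tauto
        simp only [List.foldl_cons, if_pos hL, if_pos hV, ih, List.filter_cons, hLb,
          hDb, Bool.false_eq_true, if_false, if_pos, List.map_cons, hVb, List.length_cons]
        refine Prod.ext ?_ (Prod.ext ?_ (Prod.ext ?_ ?_)) <;> push_cast <;> ring
      · have hVb : pvIsVowel (PySem.Chars.lowerChar hd) = false := by
          simp [pvIsVowel]; tauto
        simp only [List.foldl_cons, if_pos hL, if_neg hV, ih, List.filter_cons, hLb,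
          hDb, if_pos, List.map_cons, hVb, List.length_cons, Bool.false_eq_true, if_false]
        refine Prod.ext ?_ (Prod.ext ?_ (Prod.ext ?_ ?_)) <;> push_cast <;> ring
    · have hLb : pvIsLetter hd = false := by
        simpa [pvIsLetter, not_or, not_and, not_le] using hL
      by_cases hD : '0' ≤ hd ∧ hd ≤ '9'
      · have hDb : pvIsDigit hd = true := by simp [pvIsDigit, hD]
        simp only [List.foldl_cons, if_neg hL, if_pos hD, ih, List.filter_cons, hLb,
          hDb, Bool.false_eq_true, if_false, if_pos, List.length_cons]
        refine Prod.ext ?_ (Prod.ext ?_ (Prod.ext ?_ ?_)) <;> push_cast <;> ring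
      · have hDb : pvIsDigit hd = false := by
          simpa [pvIsDigit, not_and, not_le] using hD
        simp only [List.foldl_cons, if_neg hL, if_neg hD, ih, List.filter_cons, hLb,
          hDb, Bool.false_eq_true, if_false, List.length_cons]
        refine Prod.ext ?_ (Prod.ext ?_ (Prod.ext ?_ ?_)) <;> push_cast <;> ring

-- ===== VERDICT (by name: the statement is the Claim_ definition above) =====
theorem countVCDS_spec : Claim_equal_countVCDS := by
  intro str _
  unfold Spec_countVCDS countVCDS countVCDS_alt
  rw [countVCDS_fold_eq]
  simp only [List.length_map]
  refine Prod.ext ?_ (Prod.ext ?_ (Prod.ext ?_ ?_)) <;> push_cast <;> ring
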